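-- pv_equiv track=rewrite | github.com/ericbinnendyk/roots_of_unity | nth_roots.py | mtimes
-- ===== SOURCE A (Python) =====
-- def plus(l1, l2, rnum):
--     return [l1[i] + l2[i] for i in range(rnum)]
--
-- def times(l1, l2, rnum):
--     ans = [0] * rnum
--     for i in range(rnum):
--         for j in range(rnum):
--             ans[(i + j) % rnum] += l1[i] * l2[j]
--
--     return ans
--
-- def new_mat(nrow, ncol):
--     m = []
--     for i in range(nrow):
--         m.append([0] * ncol)
--     return m
--
-- def mtimes(m1, m2, rnum):
--     if len(m1) != len(m2):
--         raise RuntimeError("Cannot multiply matrices with inconsistent dimensions")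
--     nrow = len(m1)
--     ans = new_mat(nrow, rnum)
--     for i in range(nrow):
--         for j in range(nrow):
--             k = (i + j) % nrow
--             ans[k] = plus(ans[k], times(m1[i], m2[j], rnum), rnum)
--     return ans
-- ===== SOURCE B (Python) =====
-- def mtimes(m1, m2, rnum):
--     if len(m1) != len(m2):
--         raise RuntimeError("Cannot multiply matrices with inconsistent dimensions")
--     nrow = len(m1)
--     return [[sum(m1[i][p] * m2[(k - i) % nrow][(r - p) % rnum]
--                  for i in range(nrow) for p in range(rnum))
--              for r in range(rnum)]
--             for k in range(nrow)]
-- ===== Notes on version B (the rewrite author's own statement) =====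
-- stated objective: alternative
-- what changed: Replaced the scatter-style loop (per source pair (i,j),(p,q) add a convolution into cell (i+j)%n) by a direct gather comprehension that computes each output cell ans[k][r] as a single sum over i,p of m1[i][p]*m2[(k-i)%nrow][(r-p)%rnum], eliminating the plus/times helpers and intermediate row rebuilding.
import Mathlib
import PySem

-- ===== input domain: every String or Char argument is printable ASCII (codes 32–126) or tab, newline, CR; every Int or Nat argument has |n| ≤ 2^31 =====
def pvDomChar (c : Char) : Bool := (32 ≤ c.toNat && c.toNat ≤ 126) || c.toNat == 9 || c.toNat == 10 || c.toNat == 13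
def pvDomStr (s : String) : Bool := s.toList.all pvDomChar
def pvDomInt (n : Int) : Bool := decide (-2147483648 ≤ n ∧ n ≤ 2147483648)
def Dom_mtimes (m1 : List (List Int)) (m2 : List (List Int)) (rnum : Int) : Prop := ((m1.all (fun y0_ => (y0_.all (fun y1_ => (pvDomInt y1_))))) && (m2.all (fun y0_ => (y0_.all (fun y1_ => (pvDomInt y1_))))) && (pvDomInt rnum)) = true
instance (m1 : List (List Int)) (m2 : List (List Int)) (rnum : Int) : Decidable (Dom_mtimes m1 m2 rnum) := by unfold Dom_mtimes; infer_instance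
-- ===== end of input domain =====

-- B computes each output cell directly as a gather-form double sum instead of A's
-- scatter loops with plus/times helpers; equivalence of the two convolution forms is proved.


-- ===== PORT A =====
-- plus(l1, l2, rnum)
def plusA (l1 l2 : List Int) (rnum : Int) : List Int :=
  (PySem.List.pyRange 0 rnum 1).map (fun i => PySem.List.pyGetD l1 i 0 + PySem.List.pyGetD l2 i 0)

-- times(l1, l2, rnum)
def timesA (l1 l2 : List Int) (rnum : Int) : List Int :=
  (PySem.List.pyRange 0 rnum 1).foldl (fun ans i =>
    (PySem.List.pyRange 0 rnum 1).foldl (fun ans j =>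
      PySem.List.pySetD ans (PySem.Int.mod (i + j) rnum)
        (PySem.List.pyGetD ans (PySem.Int.mod (i + j) rnum) 0 +
          PySem.List.pyGetD l1 i 0 * PySem.List.pyGetD l2 j 0)) ans)
    (List.replicate rnum.toNat 0)

-- new_mat(nrow, ncol)
def newMatA (nrow ncol : Int) : List (List Int) :=
  (PySem.List.pyRange 0 nrow 1).foldl (fun m _ => m ++ [List.replicate ncol.toNat 0]) []

-- mtimes(m1, m2, rnum); on len(m1) != len(m2) Python raises RuntimeError (excluded by Pre_)
def mtimes (m1 : List (List Int)) (m2 : List (List Int)) (rnum : Int) : List (List Int) :=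
  if m1.length ≠ m2.length then [] else
  let nrow : Int := m1.length
  (PySem.List.pyRange 0 nrow 1).foldl (fun ans i =>
    (PySem.List.pyRange 0 nrow 1).foldl (fun ans j =>
      PySem.List.pySetD ans (PySem.Int.mod (i + j) nrow)
        (plusA (PySem.List.pyGetD ans (PySem.Int.mod (i + j) nrow) [])
          (timesA (PySem.List.pyGetD m1 i []) (PySem.List.pyGetD m2 j []) rnum) rnum)) ans)
    (newMatA nrow rnum)

-- ===== PORT B =====
def mtimes_alt (m1 : List (List Int)) (m2 : List (List Int)) (rnum : Int) : List (List Int) :=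
  if m1.length ≠ m2.length then [] else
  let nrow : Int := m1.length
  (PySem.List.pyRange 0 nrow 1).map (fun k =>
    (PySem.List.pyRange 0 rnum 1).map (fun r =>
      (PySem.List.pyRange 0 nrow 1).foldl (fun acc i =>
        (PySem.List.pyRange 0 rnum 1).foldl (fun acc p =>
          acc + PySem.List.pyGetD (PySem.List.pyGetD m1 i []) p 0 *
            PySem.List.pyGetD (PySem.List.pyGetD m2 (PySem.Int.mod (k - i) nrow) [])
              (PySem.Int.mod (r - p) rnum) 0) acc) 0))

-- ===== PRECONDITION & SPEC =====
-- Pre_ excludes exactly the inputs where Python A raises: a RuntimeError when the two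
-- matrices have different numbers of rows, and an IndexError when (nrow > 0 and rnum > 0 and)
-- some accessed row is shorter than rnum.
def Pre_mtimes (m1 : List (List Int)) (m2 : List (List Int)) (rnum : Int) : Prop :=
  m1.length = m2.length ∧ (∀ row ∈ m1, rnum ≤ (row.length : Int)) ∧
    (∀ row ∈ m2, rnum ≤ (row.length : Int))
instance (m1 : List (List Int)) (m2 : List (List Int)) (rnum : Int) : Decidable (Pre_mtimes m1 m2 rnum) := by unfold Pre_mtimes; infer_instance

def pvWitness_mtimes : List (List Int) × List (List Int) × Int :=
  ([[1, 2], [3, 4]], [[5, 6], [7, -1]], 2)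

def Spec_mtimes (m1 : List (List Int)) (m2 : List (List Int)) (rnum : Int) (out : List (List Int)) : Prop := out = mtimes_alt m1 m2 rnum
instance (m1 : List (List Int)) (m2 : List (List Int)) (rnum : Int) (out : List (List Int)) : Decidable (Spec_mtimes m1 m2 rnum out) := by unfold Spec_mtimes; infer_instance

-- ===== CLAIM (what is proved, stated in full; the proofs are below) =====
def Claim_equal_mtimes : Prop := ∀ (m1 : List (List Int)) (m2 : List (List Int)) (rnum : Int), Dom_mtimes m1 m2 rnum → Pre_mtimes m1 m2 rnum → Spec_mtimes m1 m2 rnum (mtimes m1 m2 rnum)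

-- ===== LEMMAS AND PROOFS =====

theorem rng (n : ℕ) : PySem.List.pyRange 0 (n:Int) 1 = List.map (Nat.cast : ℕ → Int) (List.range n) := by
  rw [PySem.List.pyRange_one]; simp

-- nested loops = loop over the pair list
theorem foldl_foldl_pairs {α β σ : Type} (xs : List α) (ys : List β) (step : σ → α → β → σ) (init : σ) :
    xs.foldl (fun s i => ys.foldl (fun s j => step s i j) s) init
      = (xs.flatMap (fun i => ys.map (fun j => (i, j)))).foldl (fun s ij => step s ij.1 ij.2) init := by
  induction xs generalizing init with
  | nil => rfl
  | cons x xs ih => simp only [List.foldl_cons, List.flatMap_cons, List.foldl_append, List.foldl_map]; exact ih _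

-- generic scatter-add loop: length, row property, projected cell value
theorem scatter_length {β : Type} (d : β) (comb : β → β → β) (upds : List (ℕ × β)) (init : List β) :
    (upds.foldl (fun ans kv => ans.set kv.1 (comb (ans.getD kv.1 d) kv.2)) init).length = init.length := by
  induction upds generalizing init with
  | nil => rfl
  | cons u us ih => simp only [List.foldl_cons]; rw [ih]; exact List.length_set ..

theorem scatter_mem {β : Type} (d : β) (comb : β → β → β) (upds : List (ℕ × β)) (init : List β)
    (P : β → Prop) (hinit : ∀ x ∈ init, P x) (hcomb : ∀ x v, P (comb x v)) :
    ∀ x ∈ upds.foldl (fun ans kv => ans.set kv.1 (comb (ans.getD kv.1 d) kv.2)) init, P x := by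
  induction upds generalizing init with
  | nil => exact hinit
  | cons u us ih =>
    simp only [List.foldl_cons]
    refine ih _ ?_
    intro x hx
    rcases List.mem_or_eq_of_mem_set hx with h | h
    · exact hinit _ h
    · subst h; exact hcomb _ _

theorem scatter_proj {β : Type} (d : β) (comb : β → β → β) (π : β → Int)
    (hcomb : ∀ x v, π (comb x v) = π x + π v)
    (upds : List (ℕ × β)) (init : List β) (k : ℕ) (hk : k < init.length) :
    π ((upds.foldl (fun ans kv => ans.set kv.1 (comb (ans.getD kv.1 d) kv.2)) init).getD k d)
      = π (init.getD k d) + (upds.map (fun kv => if kv.1 = k then π kv.2 else 0)).sum := by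
  induction upds generalizing init with
  | nil => simp
  | cons u us ih =>
    simp only [List.foldl_cons, List.map_cons, List.sum_cons]
    rw [ih _ (by rw [List.length_set]; exact hk)]
    have hset : ((init.set u.1 (comb (init.getD u.1 d) u.2)).getD k d)
        = if u.1 = k then comb (init.getD u.1 d) u.2 else init.getD k d := by
      by_cases h : u.1 = k
      · subst h
        rw [if_pos rfl, List.getD_eq_getElem?_getD, List.getElem?_set_self (by omega)]
        rfl
      · rw [if_neg h, List.getD_eq_getElem?_getD, List.getElem?_set_ne h,
          ← List.getD_eq_getElem?_getD]
    rw [hset]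
    by_cases h : u.1 = k
    · subst h; rw [if_pos rfl, if_pos rfl, hcomb]; ring
    · rw [if_neg h, if_neg h]; ring

theorem sum_map_range (f : ℕ → Int) (n : ℕ) :
    ((List.range n).map f).sum = ∑ i ∈ Finset.range n, f i := by
  induction n with
  | zero => simp
  | succ m ih => rw [List.range_succ, Finset.sum_range_succ]; simp [ih]

theorem sum_map_flatMap {α β : Type} (l : List α) (g : α → List β) (F : β → Int) :
    ((l.flatMap g).map F).sum = (l.map (fun x => ((g x).map F).sum)).sum := by
  induction l with
  | nil => rfl
  | cons x xs ih => simp [ih]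

theorem sum_pairs (n m : ℕ) (F : ℕ × ℕ → Int) :
    (((List.range n).flatMap (fun i => (List.range m).map fun j => (i, j))).map F).sum
      = ∑ i ∈ Finset.range n, ∑ j ∈ Finset.range m, F (i, j) := by
  rw [sum_map_flatMap, sum_map_range]
  refine Finset.sum_congr rfl fun i _ => ?_
  rw [List.map_map, sum_map_range]
  rfl

theorem plusA_length (l1 l2 : List Int) (rnum : Int) : (plusA l1 l2 rnum).length = rnum.toNat := by
  simp [plusA]

theorem plusA_getD (l1 l2 : List Int) (rnum : Int) (r : ℕ) (hr : r < rnum.toNat) :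
    (plusA l1 l2 rnum).getD r 0 = l1.getD r 0 + l2.getD r 0 := by
  have h0 : (0:Int) ≤ (r:Int) := by positivity
  have h1 : (r:Int) < rnum := by omega
  rw [← PySem.List.pyGetD_natCast]
  unfold plusA
  rw [PySem.List.pyGetD_map_pyRange_of_nonneg _ _ _ _ h0 h1]
  simp

theorem newMatA_eq (n : ℕ) (rnum : Int) :
    newMatA (n : Int) rnum = List.replicate n (List.replicate rnum.toNat 0) := by
  unfold newMatA
  rw [PySem.List.foldl_append_singleton_eq_map, List.map_const', PySem.List.length_pyRange_one]
  simp

theorem mod_shift (k i n : ℕ) (hi : i < n) :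
    PySem.Int.mod ((k : Int) - (i : Int)) (n : Int) = (((k + (n - i)) % n : ℕ) : Int) := by
  have hn : (0:Int) < (n:Int) := by exact_mod_cast Nat.zero_lt_of_lt hi
  rw [PySem.Int.mod_eq_emod_of_pos hn]
  · have h1 : (k : Int) - i = ((k + (n - i) : ℕ) : Int) - n := by
      push_cast [Nat.cast_sub hi.le]; ring
    rw [h1, Int.sub_emod_right]
    exact (Int.natCast_mod _ _).symm

theorem sum_unique_shift (n i k : ℕ) (hi : i < n) (hk : k < n) (X : ℕ → Int) :
    ∑ j ∈ Finset.range n, (if (i + j) % n = k then X j else 0) = X ((k + (n - i)) % n) := by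
  have hn : 0 < n := Nat.zero_lt_of_lt hk
  set j0 := (k + (n - i)) % n with hj0
  have hj0lt : j0 < n := Nat.mod_lt _ hn
  have hhit : (i + j0) % n = k := by
    rw [hj0, Nat.add_mod_mod]
    have h2 : i + (k + (n - i)) = k + n := by omega
    rw [h2, Nat.add_mod_right]
    exact Nat.mod_eq_of_lt hk
  have hcong : ∀ j ∈ Finset.range n, (if (i + j) % n = k then X j else 0) = (if j = j0 then X j else 0) := by
    intro j hj
    simp only [Finset.mem_range] at hj
    by_cases h : j = j0
    · subst h; rw [if_pos hhit, if_pos rfl]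
    · rw [if_neg ?_, if_neg h]
      intro hcontra
      apply h
      have heq : i + j ≡ i + j0 [MOD n] := by
        unfold Nat.ModEq; rw [hcontra, hhit]
      have := Nat.ModEq.add_left_cancel' i heq
      unfold Nat.ModEq at this
      rwa [Nat.mod_eq_of_lt hj, Nat.mod_eq_of_lt hj0lt] at this
  rw [Finset.sum_congr rfl hcong, Finset.sum_ite_eq' _ j0 X, if_pos (Finset.mem_range.mpr hj0lt)]

theorem core_identity (n R k r : ℕ) (hk : k < n) (hr : r < R) (a b : ℕ → ℕ → Int) :
    ∑ i ∈ Finset.range n, ∑ j ∈ Finset.range n,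
      (if (i + j) % n = k then
        ∑ p ∈ Finset.range R, ∑ q ∈ Finset.range R,
          (if (p + q) % R = r then a i p * b j q else 0)
      else 0)
    = ∑ i ∈ Finset.range n, ∑ p ∈ Finset.range R,
        a i p * b ((k + (n - i)) % n) ((r + (R - p)) % R) := by
  refine Finset.sum_congr rfl fun i hi => ?_
  rw [sum_unique_shift n i k (Finset.mem_range.mp hi) hk]
  refine Finset.sum_congr rfl fun p hp => ?_
  rw [sum_unique_shift R p r (Finset.mem_range.mp hp) hr]

theorem timesA_eq_scatter (l1 l2 : List Int) (R : ℕ) :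
    timesA l1 l2 (R : Int) =
      (((List.range R).flatMap (fun i => (List.range R).map fun j => (i, j))).map
        (fun ij => ((ij.1 + ij.2) % R, l1.getD ij.1 0 * l2.getD ij.2 0))).foldl
        (fun ans kv => ans.set kv.1 (ans.getD kv.1 0 + kv.2)) (List.replicate R 0) := by
  unfold timesA
  rw [rng]
  simp only [List.foldl_map, ← Nat.cast_add, PySem.Int.mod_natCast, PySem.List.pySetD_natCast,
    PySem.List.pyGetD_natCast, Int.toNat_natCast]
  rw [foldl_foldl_pairs]

theorem timesA_getD (l1 l2 : List Int) (R r : ℕ) (hr : r < R) :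
    (timesA l1 l2 (R : Int)).getD r 0
      = ∑ i ∈ Finset.range R, ∑ j ∈ Finset.range R,
          (if (i + j) % R = r then l1.getD i 0 * l2.getD j 0 else 0) := by
  rw [timesA_eq_scatter]
  have h := scatter_proj 0 (fun x v => x + v) id (fun _ _ => rfl)
    (((List.range R).flatMap (fun i => (List.range R).map fun j => (i, j))).map
      (fun ij => ((ij.1 + ij.2) % R, l1.getD ij.1 0 * l2.getD ij.2 0)))
    (List.replicate R 0) r (by simpa using hr)
  simp only [id] at h
  rw [h, List.map_map, sum_pairs]
  simp

theorem mtimes_eq_AS (m1 m2 : List (List Int)) (rnum : Int) (hlen : m1.length = m2.length) :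
    mtimes m1 m2 rnum =
      (((List.range m1.length).flatMap (fun i => (List.range m1.length).map fun j => (i, j))).map
        (fun ij => ((ij.1 + ij.2) % m1.length,
          timesA (m1.getD ij.1 []) (m2.getD ij.2 []) rnum))).foldl
        (fun ans kv => ans.set kv.1 (plusA (ans.getD kv.1 []) kv.2 rnum))
        (List.replicate m1.length (List.replicate rnum.toNat 0)) := by
  simp only [mtimes, hlen, ne_eq, not_true_eq_false, if_false]
  rw [show newMatA (m2.length : Int) rnum = List.replicate m2.length (List.replicate rnum.toNat 0)
      from newMatA_eq m2.length rnum]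
  rw [rng]
  simp only [List.foldl_map, ← Nat.cast_add, PySem.Int.mod_natCast, PySem.List.pySetD_natCast,
    PySem.List.pyGetD_natCast]
  rw [foldl_foldl_pairs]

theorem scatter_proj_row (rnum : Int) (r : ℕ) (hr : r < rnum.toNat)
    (upds : List (ℕ × List Int)) (init : List (List Int)) (k : ℕ) (hk : k < init.length) :
    ((upds.foldl (fun ans kv => ans.set kv.1 (plusA (ans.getD kv.1 []) kv.2 rnum)) init).getD k []).getD r 0
      = ((init.getD k []).getD r 0)
        + (upds.map (fun kv => if kv.1 = k then (kv.2).getD r 0 else 0)).sum := by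
  simpa using scatter_proj [] (fun x v => plusA x v rnum) (fun row => row.getD r 0)
    (fun x v => plusA_getD x v rnum r hr) upds init k hk

theorem A_cell (m1 m2 : List (List Int)) (rnum : Int) (hlen : m1.length = m2.length)
    (k r : ℕ) (hk : k < m1.length) (hr : r < rnum.toNat) :
    ((mtimes m1 m2 rnum).getD k []).getD r 0
      = ∑ i ∈ Finset.range m1.length, ∑ j ∈ Finset.range m1.length,
          (if (i + j) % m1.length = k then
            (timesA (m1.getD i []) (m2.getD j []) rnum).getD r 0 else 0) := by
  rw [mtimes_eq_AS m1 m2 rnum hlen, scatter_proj_row rnum r hr _ _ k (by simpa using hk)]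
  rw [List.map_map, sum_pairs]
  simp [hk]

theorem B_cell (m1 m2 : List (List Int)) (rnum : Int) (hlen : m1.length = m2.length)
    (k r : ℕ) (_hk : k < m1.length) (hr : r < rnum.toNat)
    (hk1 : k < (mtimes_alt m1 m2 rnum).length)
    (hr1 : r < ((mtimes_alt m1 m2 rnum)[k]'hk1).length) :
    ((mtimes_alt m1 m2 rnum)[k]'hk1)[r]'hr1
      = ∑ i ∈ Finset.range m1.length, ∑ p ∈ Finset.range rnum.toNat,
          (m1.getD i []).getD p 0 *
            (m2.getD ((k + (m1.length - i)) % m1.length) []).getD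
              ((r + (rnum.toNat - p)) % rnum.toNat) 0 := by
  have hR : rnum = ((rnum.toNat : ℕ) : Int) := by omega
  simp only [mtimes_alt, hlen, ne_eq, not_true_eq_false, if_false] at hr1 ⊢
  simp only [List.getElem_map, PySem.List.getElem_pyRange_one, zero_add]
  rw [hR]
  simp only [rng, List.foldl_map, PySem.List.foldl_add, zero_add, sum_map_range,
    Int.toNat_natCast]
  refine Finset.sum_congr rfl fun i hi => ?_
  refine Finset.sum_congr rfl fun p hp => ?_
  rw [mod_shift k i m2.length (Finset.mem_range.mp hi),
    mod_shift r p rnum.toNat (Finset.mem_range.mp hp)]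
  simp only [PySem.List.pyGetD_natCast]

theorem scatter_row_length (rnum : Int) (upds : List (ℕ × List Int)) (init : List (List Int)) :
    (upds.foldl (fun ans kv => ans.set kv.1 (plusA (ans.getD kv.1 []) kv.2 rnum)) init).length
      = init.length :=
  scatter_length [] (fun x v => plusA x v rnum) upds init

theorem scatter_row_mem (rnum : Int) (upds : List (ℕ × List Int)) (init : List (List Int))
    (P : List Int → Prop) (hinit : ∀ x ∈ init, P x) (hcomb : ∀ x v, P (plusA x v rnum)) :
    ∀ x ∈ upds.foldl (fun ans kv => ans.set kv.1 (plusA (ans.getD kv.1 []) kv.2 rnum)) init, P x :=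
  scatter_mem [] (fun x v => plusA x v rnum) upds init P hinit hcomb

theorem B_len (m1 m2 : List (List Int)) (rnum : Int) (hlen : m1.length = m2.length) :
    (mtimes_alt m1 m2 rnum).length = m1.length := by
  simp only [mtimes_alt, hlen, ne_eq, not_true_eq_false, if_false]
  simp

theorem B_row_len (m1 m2 : List (List Int)) (rnum : Int) (hlen : m1.length = m2.length)
    (k : ℕ) (hk1 : k < (mtimes_alt m1 m2 rnum).length) :
    ((mtimes_alt m1 m2 rnum)[k]'hk1).length = rnum.toNat := by
  simp only [mtimes_alt, hlen, ne_eq, not_true_eq_false, if_false] at hk1 ⊢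
  simp

theorem A_len (m1 m2 : List (List Int)) (rnum : Int) (hlen : m1.length = m2.length) :
    (mtimes m1 m2 rnum).length = m1.length := by
  rw [mtimes_eq_AS m1 m2 rnum hlen, scatter_row_length]
  simp

theorem A_rows (m1 m2 : List (List Int)) (rnum : Int) (hlen : m1.length = m2.length) :
    ∀ row ∈ mtimes m1 m2 rnum, row.length = rnum.toNat := by
  rw [mtimes_eq_AS m1 m2 rnum hlen]
  exact scatter_row_mem rnum _ _ (fun row => row.length = rnum.toNat)
    (fun x hx => by have := List.eq_of_mem_replicate hx; subst this; simp)
    (fun x v => plusA_length x v rnum)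

theorem final_eq (m1 m2 : List (List Int)) (rnum : Int) (hlen : m1.length = m2.length) :
    mtimes m1 m2 rnum = mtimes_alt m1 m2 rnum := by
  apply List.ext_getElem (by rw [A_len m1 m2 rnum hlen, B_len m1 m2 rnum hlen])
  intro k hk1 hk2
  have hk : k < m1.length := by rw [A_len m1 m2 rnum hlen] at hk1; exact hk1
  apply List.ext_getElem
  · rw [A_rows m1 m2 rnum hlen _ (List.getElem_mem hk1), B_row_len m1 m2 rnum hlen k hk2]
  intro r hr1 hr2
  have hr : r < rnum.toNat := by
    rw [A_rows m1 m2 rnum hlen _ (List.getElem_mem hk1)] at hr1; exact hr1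
  have hR : rnum = ((rnum.toNat : ℕ) : Int) := by omega
  rw [B_cell m1 m2 rnum hlen k r hk hr hk2 hr2]
  have e1 : (mtimes m1 m2 rnum)[k]'hk1 = (mtimes m1 m2 rnum).getD k [] :=
    (List.getD_eq_getElem _ _ hk1).symm
  have e2 : ((mtimes m1 m2 rnum)[k]'hk1)[r]'hr1
      = ((mtimes m1 m2 rnum)[k]'hk1).getD r 0 := (List.getD_eq_getElem _ _ hr1).symm
  rw [e2, e1, A_cell m1 m2 rnum hlen k r hk hr]
  have hrw : ∀ a b : List Int, (timesA a b rnum).getD r 0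
      = ∑ p ∈ Finset.range rnum.toNat, ∑ q ∈ Finset.range rnum.toNat,
          (if (p + q) % rnum.toNat = r then a.getD p 0 * b.getD q 0 else 0) := by
    intro a b
    rw [hR]
    exact timesA_getD a b rnum.toNat r hr
  simp only [hrw]
  rw [core_identity m1.length rnum.toNat k r hk hr
    (fun i p => (m1.getD i []).getD p 0) (fun j q => (m2.getD j []).getD q 0)]

-- ===== VERDICT (by name: the statement is the Claim_ definition above) =====
theorem mtimes_spec : Claim_equal_mtimes := by
  intro m1 m2 rnum _hdom hpre
  unfold Spec_mtimes
  exact final_eq m1 m2 rnum hpre.1
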